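-- pv_equiv track=rewrite | github.com/redhat-cip/python-dciclient | dciclient/vault.py | replace_vault_id
-- ===== SOURCE A (Python) =====
-- def replace_vault_id(vault_id, args):
--     found = False
--     ret = []
--     for arg in args:
--         if found:
--             ret.append("%s@%s" % (arg, vault_id))
--         else:
--             ret.append(arg)
--         found = (arg == "--vault-id")
--     return ret
-- ===== SOURCE B (Python) =====
-- def replace_vault_id(vault_id, args):
--     # Build the result back-to-front: walk the args in reverse, and when the
--     # "--vault-id" flag is seen, patch the already-emitted successor token.
--     out = []
--     for a in reversed(list(args)):
--         if a == "--vault-id" and out: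
--             out[-1] = "%s@%s" % (out[-1], vault_id)
--         out.append(a)
--     out.reverse()
--     return out
-- ===== Notes on version B (the rewrite author's own statement) =====
-- stated objective: alternative
-- what changed: Builds the result back-to-front: a reverse traversal patches the already-emitted successor token in place when the '--vault-id' flag is encountered, replacing A's forward loop with a running boolean flag.
import Mathlib
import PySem

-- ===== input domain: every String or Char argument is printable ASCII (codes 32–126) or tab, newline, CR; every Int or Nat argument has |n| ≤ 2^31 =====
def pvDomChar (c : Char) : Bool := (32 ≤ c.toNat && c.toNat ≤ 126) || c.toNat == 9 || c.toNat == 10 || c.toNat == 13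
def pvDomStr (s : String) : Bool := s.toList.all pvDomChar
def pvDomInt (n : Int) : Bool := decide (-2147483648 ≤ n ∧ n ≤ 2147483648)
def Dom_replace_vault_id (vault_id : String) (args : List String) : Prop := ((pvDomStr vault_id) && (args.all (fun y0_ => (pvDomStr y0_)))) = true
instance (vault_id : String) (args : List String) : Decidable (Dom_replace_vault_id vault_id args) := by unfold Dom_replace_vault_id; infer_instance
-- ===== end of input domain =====

-- B builds the result back-to-front: a reverse traversal patches the already-emitted
-- successor token when the "--vault-id" flag is seen (objective: alternative decomposition).

-- ===== PORT A =====
-- literal port of A: a fold carrying (found, ret), appending either "%s@%s" % (arg, vault_id) or arg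
def replace_vault_id (vault_id : String) (args : List String) : List String :=
  (args.foldl
    (fun (st : Bool × List String) arg =>
      (arg == "--vault-id",
       st.2 ++ [if st.1 then arg ++ "@" ++ vault_id else arg]))
    (false, [])).2

-- ===== PORT B =====
-- hand port of Python's `out[-1] = "%s@%s" % (out[-1], vault_id)`: replaces the last
-- element of a (nonempty) list; exact on nonempty lists, and the port only applies it
-- under the `!out.isEmpty` guard, matching Python's `and out` truthiness guard.
def pvPatchLast (vault_id : String) : List String → List String
  | [] => []
  | [y] => [y ++ "@" ++ vault_id]
  | y :: z :: ys => y :: pvPatchLast vault_id (z :: ys)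

-- literal port of B: foldl over `reversed(list(args))`, patching the last emitted token
-- when the flag is seen, then `out.reverse()`
def replace_vault_id_alt (vault_id : String) (args : List String) : List String :=
  ((args.reverse).foldl
    (fun out a =>
      (if a == "--vault-id" && !out.isEmpty then pvPatchLast vault_id out else out) ++ [a])
    []).reverse

-- ===== PRECONDITION & SPEC =====
def Spec_replace_vault_id (vault_id : String) (args : List String) (out : List String) : Prop := out = replace_vault_id_alt vault_id args
instance (vault_id : String) (args : List String) (out : List String) : Decidable (Spec_replace_vault_id vault_id args out) := by unfold Spec_replace_vault_id; infer_instance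

-- ===== CLAIM (what is proved, stated in full; the proofs are below) =====
def Claim_equal_replace_vault_id : Prop := ∀ (vault_id : String) (args : List String), Dom_replace_vault_id vault_id args → Spec_replace_vault_id vault_id args (replace_vault_id vault_id args)

-- ===== LEMMAS AND PROOFS =====

-- structural form of A's loop body (proof helper)
def goA (vault_id : String) : Bool → List String → List String
  | _, [] => []
  | found, x :: xs =>
      (if found then x ++ "@" ++ vault_id else x) :: goA vault_id (x == "--vault-id") xs

theorem foldl_eq_goA (vault_id : String) (l : List String) :
    ∀ (found : Bool) (acc : List String),
    (l.foldl
      (fun (st : Bool × List String) arg =>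
        (arg == "--vault-id",
         st.2 ++ [if st.1 then arg ++ "@" ++ vault_id else arg]))
      (found, acc)).2 = acc ++ goA vault_id found l := by
  induction l with
  | nil => intro found acc; simp [goA]
  | cons x xs ih =>
      intro found acc
      simp only [List.foldl_cons, goA, ih]
      simp

-- "tag the FIRST element" — the mirror image of pvPatchLast under reversal
def patchFirst (vault_id : String) : Bool → List String → List String
  | true, y :: ys => (y ++ "@" ++ vault_id) :: ys
  | _, l => l

-- forward structural recursion: result of B, seen from the front
def goB (vault_id : String) : List String → List String
  | [] => []
  | h :: t => h :: patchFirst vault_id (h == "--vault-id") (goB vault_id t)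

theorem patchFirst_append (vault_id : String) (l : List String) (y : String) (h : l ≠ []) :
    patchFirst vault_id true (l ++ [y]) = patchFirst vault_id true l ++ [y] := by
  cases l with
  | nil => exact absurd rfl h
  | cons a as => simp [patchFirst]

theorem patchLast_reverse (vault_id : String) (l : List String) :
    (pvPatchLast vault_id l).reverse = patchFirst vault_id true l.reverse := by
  induction l with
  | nil => simp [pvPatchLast, patchFirst]
  | cons a as ih =>
      cases as with
      | nil => simp [pvPatchLast, patchFirst]
      | cons b bs =>
          simp only [pvPatchLast, List.reverse_cons]
          rw [ih]
          rw [patchFirst_append vault_id (bs.reverse ++ [b]) a (by simp)]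
          rw [List.reverse_cons]

theorem foldr_eq_goB (vault_id : String) (l : List String) :
    (l.foldr
      (fun a out =>
        (if a == "--vault-id" && !out.isEmpty then pvPatchLast vault_id out else out) ++ [a])
      []).reverse = goB vault_id l := by
  induction l with
  | nil => simp [goB]
  | cons h t ih =>
      simp only [List.foldr_cons, goB, List.reverse_append, List.reverse_cons,
        List.reverse_nil, List.nil_append, List.cons_append]
      by_cases hm : h = "--vault-id"
      · subst hm
        by_cases he : (t.foldr
            (fun a out =>
              (if a == "--vault-id" && !out.isEmpty then pvPatchLast vault_id out else out) ++ [a])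
            []) = []
        · rw [he] at ih ⊢
          simp [patchFirst, ← ih]
        · simp only [List.isEmpty_eq_false_iff.mpr he, beq_self_eq_true, Bool.not_false,
            Bool.and_true, if_true]
          rw [patchLast_reverse, ih]
      · have : (h == "--vault-id") = false := by simpa using hm
        simp only [this, Bool.false_and, Bool.false_eq_true, if_false, ih]
        simp [patchFirst]

theorem goA_eq_patch_goB (vault_id : String) (l : List String) :
    ∀ found : Bool, goA vault_id found l = patchFirst vault_id found (goB vault_id l) := by
  induction l with
  | nil => intro found; cases found <;> simp [goA, goB, patchFirst]
  | cons x xs ih =>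
      intro found
      simp only [goA, goB, ih (x == "--vault-id")]
      cases found <;> simp [patchFirst]

-- ===== VERDICT (by name: the statement is the Claim_ definition above) =====
theorem replace_vault_id_spec : Claim_equal_replace_vault_id := by
  intro vault_id args _
  unfold Spec_replace_vault_id replace_vault_id replace_vault_id_alt
  rw [foldl_eq_goA, List.nil_append, goA_eq_patch_goB, List.foldl_reverse]
  rw [foldr_eq_goB]
  simp [patchFirst]
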